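-- pv_equiv track=rewrite | github.com/vijaykrishna2525/DOCUSTITCH | docustitch/parsers/pdf_fallback.py | _dehyphenate
-- ===== SOURCE A (Python) =====
-- from typing import List, Dict
--
-- def _dehyphenate(lines: List[str]) -> List[str]:
--     out=[]
--     for i, l in enumerate(lines):
--         if out and out[-1].endswith("-") and l and l[:1].isalnum():
--             out[-1] = out[-1][:-1] + l  # join hyphen break across lines
--         else:
--             out.append(l)
--     return out
-- ===== SOURCE B (Python) =====
-- from typing import List
--
--
-- def _dehyphenate(lines: List[str]) -> List[str]:
--     # Phase 1: group consecutive lines into runs; a line joins the current run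
--     # iff the run's last raw line ends with '-' and the line starts alphanumeric.
--     runs: List[List[str]] = []
--     for l in lines:
--         if runs and runs[-1][-1].endswith("-") and l and l[:1].isalnum():
--             runs[-1].append(l)
--         else:
--             runs.append([l])
--     # Phase 2: render each run: hyphens dropped from all but the last piece.
--     return ["".join(x[:-1] for x in run[:-1]) + run[-1] for run in runs]
-- ===== Notes on version B (the rewrite author's own statement) =====
-- stated objective: alternative
-- what changed: Replaces A's mutate-the-last-accumulated-string single pass by a two-phase shape: first group consecutive lines into runs (joining on the previous RAW line's trailing '-'), then render each run by concatenating all pieces with their hyphens stripped plus the last piece.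
import Mathlib
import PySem

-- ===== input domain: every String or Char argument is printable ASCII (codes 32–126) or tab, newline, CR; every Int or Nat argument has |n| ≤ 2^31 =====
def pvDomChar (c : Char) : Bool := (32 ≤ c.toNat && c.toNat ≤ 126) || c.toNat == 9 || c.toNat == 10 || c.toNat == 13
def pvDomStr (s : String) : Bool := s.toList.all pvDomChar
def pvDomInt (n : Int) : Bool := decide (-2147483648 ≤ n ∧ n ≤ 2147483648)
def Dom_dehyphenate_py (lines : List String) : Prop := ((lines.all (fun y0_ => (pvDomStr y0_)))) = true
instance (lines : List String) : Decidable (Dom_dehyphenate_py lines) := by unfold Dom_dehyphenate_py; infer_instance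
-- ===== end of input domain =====

-- B replaces A's mutate-the-last-accumulated-string pass by a two-phase shape (group lines
-- into runs, then render each run); same cost, alternative decomposition.

-- shared small helpers: xs[-1] with a default, x[:-1], and the textual merge test both
-- Pythons share (A applies it to the accumulated string, B to the run's last raw line)
def pyLast {α : Type} (xs : List α) (d : α) : α := (xs.getLast?).getD d
def strDropLast (x : String) : String := PySem.Str.slice x none (some (-1))
def mergeCond (prev l : String) : Bool :=
  PySem.Str.endswith prev "-" && !(l == "") && PySem.Str.strIsalnum (PySem.Str.slice l none (some 1))

-- ===== PORT A =====
def stepA (out : List String) (l : String) : List String :=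
  if out ≠ [] ∧ mergeCond (pyLast out "") l = true then
    out.dropLast ++ [strDropLast (pyLast out "") ++ l]
  else out ++ [l]

def dehyphenate_py (lines : List String) : List String :=
  lines.foldl stepA []

-- ===== PORT B =====
def renderRun (run : List String) : String :=
  PySem.Str.join "" (run.dropLast.map strDropLast) ++ pyLast run ""

def stepB (runs : List (List String)) (l : String) : List (List String) :=
  if runs ≠ [] ∧ mergeCond (pyLast (pyLast runs []) "") l = true then
    runs.dropLast ++ [pyLast runs [] ++ [l]]
  else runs ++ [[l]]

def dehyphenate_py_alt (lines : List String) : List String :=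
  (lines.foldl stepB []).map renderRun

-- ===== PRECONDITION & SPEC =====
def Spec_dehyphenate_py (lines : List String) (out : List String) : Prop := out = dehyphenate_py_alt lines
instance (lines : List String) (out : List String) : Decidable (Spec_dehyphenate_py lines out) := by unfold Spec_dehyphenate_py; infer_instance

-- ===== CLAIM (what is proved, stated in full; the proofs are below) =====
def Claim_equal_dehyphenate_py : Prop := ∀ (lines : List String), Dom_dehyphenate_py lines → Spec_dehyphenate_py lines (dehyphenate_py lines)

-- ===== LEMMAS AND PROOFS =====

-- invariant of B's run list: runs are nonempty, and a run of ≥ 2 lines ends in a nonempty line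
def pvInv (runs : List (List String)) : Prop :=
  ∀ r ∈ runs, r ≠ [] ∧ (r.dropLast ≠ [] → pyLast r "" ≠ "")

theorem pyLast_concat {α : Type} (xs : List α) (a d : α) : pyLast (xs ++ [a]) d = a := by
  simp [pyLast]

theorem joinFlatten : ∀ xs : List (List Char), PySem.Chars.join [] xs = xs.flatten := by
  intro xs
  induction xs with
  | nil => simp [PySem.Chars.join_nil]
  | cons a t ih =>
    cases t with
    | nil => simp [PySem.Chars.join_singleton]
    | cons b t' => rw [PySem.Chars.join_cons_cons]; simp [ih]

theorem renderRun_toList (r : List String) :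
    (renderRun r).toList
      = ((r.dropLast.map strDropLast).map String.toList).flatten ++ (pyLast r "").toList := by
  simp [renderRun, String.toList_append, PySem.Str.toList_join, joinFlatten]

theorem renderRun_singleton (l : String) : renderRun [l] = l := by
  apply String.toList_inj.mp
  simp [renderRun_toList, pyLast]

theorem dash_suffix_iff (s : List Char) : ['-'] <:+ s ↔ s.getLast? = some '-' := by
  constructor
  · rintro ⟨t, rfl⟩; simp
  · intro h
    rcases s.eq_nil_or_concat with rfl | ⟨ys, a, rfl⟩
    · simp at h
    · simp at h
      exact ⟨ys, by simp [h]⟩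

theorem endswith_dash_toList (s : String) :
    PySem.Str.endswith s "-" = true ↔ s.toList.getLast? = some '-' := by
  rw [PySem.Str.endswith_eq]
  have h1 : ("-" : String).toList = ['-'] := by decide
  rw [h1, PySem.Chars.endswith_iff, dash_suffix_iff]

theorem endswith_render (r : List String) (hne : r ≠ [])
    (hinv : r.dropLast ≠ [] → pyLast r "" ≠ "") :
    PySem.Str.endswith (renderRun r) "-" = PySem.Str.endswith (pyLast r "") "-" := by
  by_cases hd : r.dropLast = []
  · cases r with
    | nil => exact absurd rfl hne
    | cons x t =>
      have ht : t = [] := by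
        cases t with
        | nil => rfl
        | cons b t2 => simp at hd
      subst ht
      rw [show pyLast [x] "" = x by simp [pyLast], renderRun_singleton x]
  · have hlast : pyLast r "" ≠ "" := hinv hd
    have hlt : (pyLast r "").toList ≠ [] := fun h => hlast (String.toList_eq_nil_iff.mp h)
    rw [Bool.eq_iff_iff, endswith_dash_toList, endswith_dash_toList, renderRun_toList,
      List.getLast?_append_of_ne_nil _ hlt]

theorem merge_render (r : List String) (l : String) (hne : r ≠ [])
    (hml : PySem.Str.endswith (pyLast r "") "-" = true) :
    renderRun (r ++ [l]) = strDropLast (renderRun r) ++ l := by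
  obtain ⟨ys, a, rfl⟩ := (r.eq_nil_or_concat).resolve_left hne
  simp only [List.concat_eq_append] at *
  have ha : pyLast (ys ++ [a]) "" = a := pyLast_concat ys a ""
  have hat : a.toList ≠ [] := by
    intro h0
    rw [ha] at hml
    have := (endswith_dash_toList a).mp hml
    rw [h0] at this; simp at this
  apply String.toList_inj.mp
  rw [String.toList_append, renderRun_toList]
  simp only [strDropLast, PySem.Str.slice_to_neg_one, renderRun_toList, ha,
    List.dropLast_concat, pyLast_concat, List.map_append, List.flatten_append,
    List.dropLast_append_of_ne_nil hat]
  simp [strDropLast, PySem.List.slice_to_neg_one]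

theorem mergeCond_render (r : List String) (l : String) (hne : r ≠ [])
    (hinv : r.dropLast ≠ [] → pyLast r "" ≠ "") :
    mergeCond (renderRun r) l = mergeCond (pyLast r "") l := by
  simp only [mergeCond, endswith_render r hne hinv]

theorem inv_stepB (runs : List (List String)) (l : String) (h : pvInv runs) :
    pvInv (stepB runs l) := by
  unfold stepB
  split_ifs with hc
  · intro r hr
    rcases List.mem_append.mp hr with hm | hm
    · exact h r ((List.dropLast_sublist runs).subset hm)
    · have hr' : r = pyLast runs [] ++ [l] := by simpa using hm
      subst hr'
      have hl : l ≠ "" := by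
        have := hc.2
        simp only [mergeCond, Bool.and_eq_true, Bool.not_eq_true', beq_eq_false_iff_ne] at this
        exact this.1.2
      exact ⟨by simp, fun _ => by rw [pyLast_concat]; exact hl⟩
  · intro r hr
    rcases List.mem_append.mp hr with hm | hm
    · exact h r hm
    · have hr' : r = [l] := by simpa using hm
      subst hr'
      exact ⟨by simp, by simp⟩

theorem step_commute (runs : List (List String)) (l : String) (h : pvInv runs) :
    stepA (runs.map renderRun) l = (stepB runs l).map renderRun := by
  rcases runs.eq_nil_or_concat with rfl | ⟨rs, r, rfl⟩
  · simp [stepA, stepB, renderRun_singleton]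
  · simp only [List.concat_eq_append] at *
    have hr := h r (by simp)
    have hmapLast : pyLast ((rs ++ [r]).map renderRun) "" = renderRun r := by
      rw [List.map_append]; exact pyLast_concat _ _ _
    have hrunsLast : pyLast (rs ++ [r]) ([] : List String) = r := pyLast_concat _ _ _
    have hcond : mergeCond (pyLast ((rs ++ [r]).map renderRun) "") l
        = mergeCond (pyLast (pyLast (rs ++ [r]) []) "") l := by
      rw [hmapLast, hrunsLast, mergeCond_render r l hr.1 hr.2]
    unfold stepA stepB
    by_cases hc : mergeCond (pyLast (pyLast (rs ++ [r]) []) "") l = true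
    · rw [if_pos ⟨by simp, by rw [hcond]; exact hc⟩, if_pos ⟨by simp, hc⟩]
      have hml : PySem.Str.endswith (pyLast r "") "-" = true := by
        rw [hrunsLast] at hc
        simp only [mergeCond, Bool.and_eq_true] at hc
        exact hc.1.1
      rw [hmapLast, hrunsLast]
      simp [merge_render r l hr.1 hml]
    · rw [if_neg (fun hh => hc (by rw [← hcond]; exact hh.2)), if_neg (fun hh => hc hh.2)]
      simp [renderRun_singleton]

theorem loop_eq : ∀ (lines : List String) (runs : List (List String)), pvInv runs →
    lines.foldl stepA (runs.map renderRun) = (lines.foldl stepB runs).map renderRun := by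
  intro lines
  induction lines with
  | nil => intro runs _; simp
  | cons l t ih =>
    intro runs h
    simp only [List.foldl_cons]
    rw [step_commute runs l h]
    exact ih _ (inv_stepB runs l h)

-- ===== VERDICT (by name: the statement is the Claim_ definition above) =====
theorem dehyphenate_py_spec : Claim_equal_dehyphenate_py := by
  intro lines _
  unfold Spec_dehyphenate_py dehyphenate_py dehyphenate_py_alt
  have := loop_eq lines [] (by intro r hr; simp at hr)
  simpa using this
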